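-- pv_equiv track=rewrite | github.com/huangxiang360729/classifier-pruner | models/resnet.py | convert_list_to_cfg
-- ===== SOURCE A (Python) =====
-- from copy import deepcopy
--
-- def convert_list_to_cfg(li):
--     layers = len(li) + 1 # '1' is linear layer
--     if layers in [18, 34]:
--         block_convs = 2
--     else:
--         block_convs = 3
--
--     first_conv_flag = True
--     cfg = []
--     block = []
--     count = 0
--     for i in range(len(li)):
--         if first_conv_flag: # first conv's output channels
--             block = [li[i]]
--             cfg.append(deepcopy(block))
--             block.clear()
--             first_conv_flag = False
--
--         else: # all conv's output channels in a block, but shortcut's conv is not included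
--             block.append(li[i])
--             count = count + 1
--             if count == block_convs:
--                 cfg.append(deepcopy(block))
--                 block.clear()
--                 count = 0
--     return cfg
-- ===== SOURCE B (Python) =====
-- from copy import deepcopy
--
-- def convert_list_to_cfg(li):
--     layers = len(li) + 1  # '1' is linear layer
--     block_convs = 2 if layers in [18, 34] else 3
--     if not li:
--         return []
--     cfg = [deepcopy([li[0]])]
--     rest = li[1:]
--     while len(rest) >= block_convs:
--         cfg.append(deepcopy(rest[:block_convs]))
--         rest = rest[block_convs:]
--     return cfg
-- ===== Notes on version B (the rewrite author's own statement) =====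
-- stated objective: simpler
-- what changed: Replaces the flag/accumulator/counter state machine with a head split followed by a while loop that slices off one complete block at a time (incomplete trailing blocks dropped, as in A).
import Mathlib
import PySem

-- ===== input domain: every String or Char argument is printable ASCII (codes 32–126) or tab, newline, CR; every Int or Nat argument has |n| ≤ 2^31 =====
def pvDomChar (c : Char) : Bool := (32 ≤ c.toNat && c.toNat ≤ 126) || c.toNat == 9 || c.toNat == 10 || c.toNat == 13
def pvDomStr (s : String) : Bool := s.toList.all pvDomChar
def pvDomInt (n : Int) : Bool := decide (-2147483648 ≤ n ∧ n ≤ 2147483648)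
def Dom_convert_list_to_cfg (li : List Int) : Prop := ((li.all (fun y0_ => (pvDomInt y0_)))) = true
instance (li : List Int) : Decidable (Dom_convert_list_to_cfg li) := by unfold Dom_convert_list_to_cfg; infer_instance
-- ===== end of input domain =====

-- B replaces A's flag/counter state machine by a head split plus a while loop slicing off one complete block at a time (simpler decomposition, same O(n) cost).


-- ===== PORT A =====
-- A's for-loop over li, carrying exactly its state (first_conv_flag, cfg, block, count).
def convAGo (block_convs : Int) (xs : List Int) (flag : Bool) (cfg : List (List Int))
    (block : List Int) (count : Int) : List (List Int) :=
  match xs with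
  | [] => cfg
  | x :: xs =>
    if flag then
      -- block = [li[i]]; cfg.append(deepcopy(block)); block.clear()
      convAGo block_convs xs false (cfg ++ [[x]]) [] count
    else
      -- block.append(li[i]); count += 1; if count == block_convs: emit
      let block' := block ++ [x]
      let count' := count + 1
      if count' = block_convs then convAGo block_convs xs false (cfg ++ [block']) [] 0
      else convAGo block_convs xs false cfg block' count'

def convert_list_to_cfg (li : List Int) : List (List Int) :=
  let layers : Int := (li.length : Int) + 1
  let block_convs : Int := if layers = 18 ∨ layers = 34 then 2 else 3
  convAGo block_convs li true [] [] 0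

-- ===== PORT B =====
-- Source B's while loop: while len(rest) >= block_convs: emit rest[:block_convs]; rest = rest[block_convs:].
-- Slices with nonnegative bound block_convs are exactly take/drop; the '0 < bc' conjunct is only a totality guard (bc is always 2 or 3).
def chunkB (bc : Nat) (rest : List Int) : List (List Int) :=
  if _h : 0 < bc ∧ bc ≤ rest.length then
    rest.take bc :: chunkB bc (rest.drop bc)
  else []
termination_by rest.length
decreasing_by simp only [List.length_drop]; omega

def convert_list_to_cfg_alt (li : List Int) : List (List Int) :=
  let layers : Int := (li.length : Int) + 1
  let block_convs : Nat := if layers = 18 ∨ layers = 34 then 2 else 3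
  match li with
  | [] => []
  | x :: rest => [x] :: chunkB block_convs rest

-- ===== PRECONDITION & SPEC =====
def Spec_convert_list_to_cfg (li : List Int) (out : List (List Int)) : Prop := out = convert_list_to_cfg_alt li
instance (li : List Int) (out : List (List Int)) : Decidable (Spec_convert_list_to_cfg li out) := by unfold Spec_convert_list_to_cfg; infer_instance

-- ===== CLAIM (what is proved, stated in full; the proofs are below) =====
def Claim_equal_convert_list_to_cfg : Prop := ∀ (li : List Int), Dom_convert_list_to_cfg li → Spec_convert_list_to_cfg li (convert_list_to_cfg li)

-- ===== LEMMAS AND PROOFS =====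

-- Proof-side characterisation of A's non-first-conv loop: fill `block` to size bc, emit, repeat.
def chunkAux (bc : Nat) (block : List Int) (xs : List Int) : List (List Int) :=
  match xs with
  | [] => []
  | x :: xs =>
    if block.length + 1 = bc then (block ++ [x]) :: chunkAux bc [] xs
    else chunkAux bc (block ++ [x]) xs

theorem convAGo_eq_chunkAux (bcN : Nat) (xs : List Int) : ∀ (cfg : List (List Int)) (block : List Int),
    convAGo (bcN : Int) xs false cfg block (block.length : Int) = cfg ++ chunkAux bcN block xs := by
  induction xs with
  | nil => intro cfg block; simp [convAGo, chunkAux]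
  | cons x xs ih =>
    intro cfg block
    have hiff : ((block.length : Int) + 1 = (bcN : Int)) ↔ (block.length + 1 = bcN) := by
      constructor <;> intro h <;> omega
    by_cases h : block.length + 1 = bcN
    · have h' : (block.length : Int) + 1 = (bcN : Int) := hiff.mpr h
      have := ih (cfg ++ [block ++ [x]]) []
      simp only [List.length_nil, Int.natCast_zero] at this
      simp only [convAGo, chunkAux, if_pos h', if_pos h, this, List.append_assoc,
        List.singleton_append]
      simp
    · have h' : ¬ ((block.length : Int) + 1 = (bcN : Int)) := fun hh => h (hiff.mp hh)
      have := ih cfg (block ++ [x])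
      simp only [List.length_append, List.length_singleton] at this
      simp only [convAGo, chunkAux, if_neg h', if_neg h]
      rw [show (block.length : Int) + 1 = ((block.length + 1 : Nat) : Int) by omega, this]
      simp

theorem chunkAux_eq_chunkB (bc : Nat) (hbc : 0 < bc) (xs : List Int) :
    ∀ (block : List Int), block.length < bc → chunkAux bc block xs = chunkB bc (block ++ xs) := by
  induction xs with
  | nil =>
    intro block hlt
    rw [chunkAux, List.append_nil, chunkB]
    rw [dif_neg (by omega)]
  | cons x xs ih =>
    intro block hlt
    by_cases h : block.length + 1 = bc
    · have hsplit : block ++ x :: xs = (block ++ [x]) ++ xs := by simp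
      have hlen : (block ++ [x]).length = bc := by simp; omega
      rw [chunkAux, if_pos h, hsplit, chunkB, dif_pos ⟨hbc, by simp; omega⟩]
      rw [List.take_left' hlen, List.drop_left' hlen]
      rw [ih [] (by simpa using hbc)]
      simp
    · rw [chunkAux, if_neg h, ih (block ++ [x]) (by simp; omega)]
      simp

theorem convA_head (bcN : Nat) (hbc : 0 < bcN) (x : Int) (rest : List Int) :
    convAGo (bcN : Int) (x :: rest) true [] [] 0 = [x] :: chunkB bcN rest := by
  have h1 := convAGo_eq_chunkAux bcN rest [[x]] []
  simp only [List.length_nil, Int.natCast_zero] at h1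
  rw [convAGo, if_pos rfl, List.nil_append, h1, chunkAux_eq_chunkB bcN hbc rest [] (by simpa using hbc)]
  simp

-- ===== VERDICT (by name: the statement is the Claim_ definition above) =====
theorem convert_list_to_cfg_spec : Claim_equal_convert_list_to_cfg := by
  intro li _
  unfold Spec_convert_list_to_cfg convert_list_to_cfg convert_list_to_cfg_alt
  cases li with
  | nil => simp [convAGo]
  | cons x rest =>
    simp only []
    rw [show (if (((x :: rest).length : Int) + 1 = 18) ∨ (((x :: rest).length : Int) + 1 = 34) then (2 : Int) else 3)
          = ((if (((x :: rest).length : Int) + 1 = 18) ∨ (((x :: rest).length : Int) + 1 = 34) then (2 : Nat) else 3 : Nat) : Int)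
        from by split <;> rfl]
    exact convA_head _ (by split <;> omega) x rest
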